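-- pv_equiv track=rewrite | github.com/pypi-data/pypi-mirror-324 | packages/geoforge/geoforge-0.0.1.tar.gz/geoforge-0.0.1/geoforge/geoforge.py | get_overview_levels
-- ===== SOURCE A (Python) =====
-- def get_overview_levels(height, width):
--     """Calculate appropriate overview levels"""
--     max_dimension = max(height, width)
--     levels = []
--     factor = 2
--
--     while max_dimension // factor >= 512:
--         levels.append(factor)
--         factor *= 2
--
--     return levels
-- ===== SOURCE B (Python) =====
-- def get_overview_levels(height, width):
--     """Calculate appropriate overview levels"""
--     q = max(height, width) // 512
--     if q < 2:
--         return []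
--     n = q.bit_length() - 1
--     return [2 ** k for k in range(1, n + 1)]
-- ===== Notes on version B (the rewrite author's own statement) =====
-- stated objective: alternative
-- what changed: Replaces A's accumulate-while-condition doubling loop with a closed-form level count via bit_length (n = (max_dim//512).bit_length() - 1) and direct counted generation of [2**k for k in range(1, n+1)].
import Mathlib
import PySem

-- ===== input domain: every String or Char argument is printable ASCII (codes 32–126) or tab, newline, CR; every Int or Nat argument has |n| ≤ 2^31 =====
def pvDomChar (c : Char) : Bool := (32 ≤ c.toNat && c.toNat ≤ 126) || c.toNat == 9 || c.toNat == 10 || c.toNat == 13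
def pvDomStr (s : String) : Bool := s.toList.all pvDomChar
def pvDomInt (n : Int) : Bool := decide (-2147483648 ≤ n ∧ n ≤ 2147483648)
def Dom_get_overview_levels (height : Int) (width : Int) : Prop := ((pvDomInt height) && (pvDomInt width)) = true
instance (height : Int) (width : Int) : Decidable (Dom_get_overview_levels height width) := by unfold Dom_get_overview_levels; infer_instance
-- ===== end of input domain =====

-- B computes the number of levels in closed form via bit_length and generates the
-- list directly, instead of A's accumulate-while-condition doubling loop (objective: alternative).

-- ===== PORT A =====
-- termination helper for A's while loop: if the loop condition holds, the factor is
-- nonzero and bounded in magnitude by the dimension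
theorem pvOvlCondBound (md f : Int) (h : 512 ≤ PySem.Int.floordiv md f) :
    1 ≤ f.natAbs ∧ f.natAbs ≤ md.natAbs := by
  rcases lt_trichotomy f 0 with hf | hf | hf
  · have h2 : PySem.Int.floordiv md f = PySem.Int.floordiv (-md) (-f) := by
      rw [← PySem.Int.floordiv_neg_neg md f]
    rw [h2, PySem.Int.le_floordiv_iff_mul_le (by omega)] at h
    omega
  · subst hf; simp [PySem.Int.floordiv] at h
  · rw [PySem.Int.le_floordiv_iff_mul_le hf] at h
    omega

-- A's while loop, transliterated: while md // factor >= 512: levels.append(factor); factor *= 2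
def getOvlLoop (md : Int) (factor : Int) (levels : List Int) : List Int :=
  if h : 512 ≤ PySem.Int.floordiv md factor then
    getOvlLoop md (factor * 2) (levels ++ [factor])
  else
    levels
termination_by (md.natAbs + 1 - factor.natAbs)
decreasing_by
  have := pvOvlCondBound md factor h
  have : (factor * 2).natAbs = factor.natAbs * 2 := by
    simp [Int.natAbs_mul]
  omega

def get_overview_levels (height : Int) (width : Int) : List Int :=
  getOvlLoop (max height width) 2 []

-- ===== PORT B =====
-- q = max(height, width) // 512; if q < 2: []; n = q.bit_length() - 1;
-- [2**k for k in range(1, n+1)]  (2**k ported as 2^k.toNat; k ≥ 1 throughout the range)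
def get_overview_levels_alt (height : Int) (width : Int) : List Int :=
  let q := PySem.Int.floordiv (max height width) 512
  if q < 2 then []
  else
    let n : Nat := PySem.Int.bitLength q - 1
    (PySem.List.pyRange 1 ((n : Int) + 1) 1).map (fun k => (2 : Int) ^ k.toNat)

-- ===== PRECONDITION & SPEC =====
def Spec_get_overview_levels (height : Int) (width : Int) (out : List Int) : Prop := out = get_overview_levels_alt height width
instance (height : Int) (width : Int) (out : List Int) : Decidable (Spec_get_overview_levels height width out) := by unfold Spec_get_overview_levels; infer_instance

-- ===== CLAIM (what is proved, stated in full; the proofs are below) =====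
def Claim_equal_get_overview_levels : Prop := ∀ (height : Int) (width : Int), Dom_get_overview_levels height width → Spec_get_overview_levels height width (get_overview_levels height width)

-- ===== LEMMAS AND PROOFS =====

-- the loop condition at factor 2^k says exactly 2^k ≤ md // 512
theorem pvOvlCond_iff (md : Int) (k : Nat) :
    (512 ≤ PySem.Int.floordiv md ((2 : Int) ^ k)) ↔
    (2 : Int) ^ k ≤ PySem.Int.floordiv md 512 := by
  rw [PySem.Int.le_floordiv_iff_mul_le (b := (2:Int)^k) (by positivity),
      PySem.Int.le_floordiv_iff_mul_le (b := (512:Int)) (by norm_num)]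
  constructor <;> intro h <;> linarith [h]

-- for q ≥ 2, 2^k ≤ q iff k ≤ bit_length q - 1
theorem pvOvlPow_le_iff (q : Int) (hq : 2 ≤ q) (k : Nat) :
    (2 : Int) ^ k ≤ q ↔ k ≤ PySem.Int.bitLength q - 1 := by
  have hq0 : q.natAbs = q.toNat := by omega
  have hqn : (q.natAbs : Int) = q := by omega
  have hlt := PySem.Int.lt_two_pow_bitLength q
  have hle := PySem.Int.two_pow_bitLength_le q (by omega)
  have hbl1 : 1 ≤ PySem.Int.bitLength q := by
    by_contra hc
    push_neg at hc
    interval_cases h : PySem.Int.bitLength q <;> simp_all <;> omega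
  constructor
  · intro h
    by_contra hc
    push_neg at hc
    have hk : PySem.Int.bitLength q ≤ k := by omega
    have h4 : q.natAbs < 2 ^ k :=
      lt_of_lt_of_le hlt (Nat.pow_le_pow_right (by norm_num) hk)
    have h5 : (q : Int) < (2 : Int) ^ k := by
      rw [← hqn]
      exact_mod_cast h4
    linarith
  · intro h
    have h2 : (2 : Nat) ^ k ≤ 2 ^ (PySem.Int.bitLength q - 1) :=
      Nat.pow_le_pow_right (by norm_num) h
    have h3 : (2 : Nat) ^ k ≤ q.natAbs := le_trans h2 hle
    have h6 : ((2 ^ k : Nat) : Int) ≤ (q.natAbs : Int) := by exact_mod_cast h3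
    rw [hqn] at h6
    push_cast at h6
    exact h6

-- the number of levels, as a Nat
def pvOvlN (md : Int) : Nat :=
  if 2 ≤ PySem.Int.floordiv md 512 then PySem.Int.bitLength (PySem.Int.floordiv md 512) - 1 else 0

-- characterisation of A's loop starting at factor 2^k
theorem pvOvlLoop_eq (md : Int) : ∀ (m k : Nat) (acc : List Int), 1 ≤ k → m = pvOvlN md + 1 - k →
    getOvlLoop md ((2 : Int) ^ k) acc = acc ++ (List.range' k m).map (fun i => (2 : Int) ^ i) := by
  intro m
  induction m with
  | zero =>
    intro k acc hk hm
    rw [getOvlLoop]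
    rw [dif_neg, List.range', List.map_nil, List.append_nil]
    rw [pvOvlCond_iff]
    set q := PySem.Int.floordiv md 512 with hq
    by_cases h2 : 2 ≤ q
    · rw [pvOvlPow_le_iff q h2 k]
      simp only [pvOvlN, ← hq, if_pos h2] at hm
      omega
    · push_neg at h2
      intro hc
      have : (2 : Int) ^ 1 ≤ (2 : Int) ^ k := by
        apply pow_le_pow_right₀ (by norm_num) hk
      simp at this
      omega
  | succ m ih =>
    intro k acc hk hm
    have hkN : k ≤ pvOvlN md := by omega
    have hq2 : 2 ≤ PySem.Int.floordiv md 512 := by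
      by_contra hc
      simp only [pvOvlN, if_neg hc] at hm
      omega
    have hN : pvOvlN md = PySem.Int.bitLength (PySem.Int.floordiv md 512) - 1 := by
      unfold pvOvlN
      rw [if_pos hq2]
    have hcond : 512 ≤ PySem.Int.floordiv md ((2 : Int) ^ k) := by
      rw [pvOvlCond_iff, pvOvlPow_le_iff _ hq2]
      omega
    rw [getOvlLoop, dif_pos hcond]
    have hpow : (2 : Int) ^ k * 2 = (2 : Int) ^ (k + 1) := by ring
    rw [hpow, ih (k + 1) (acc ++ [(2 : Int) ^ k]) (by omega) (by omega)]
    rw [List.range'_succ, List.map_cons, List.append_assoc, List.singleton_append]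

-- ===== VERDICT (by name: the statement is the Claim_ definition above) =====
theorem get_overview_levels_spec : Claim_equal_get_overview_levels := by
  intro height width _
  unfold Spec_get_overview_levels get_overview_levels get_overview_levels_alt
  have hloop := pvOvlLoop_eq (max height width) (pvOvlN (max height width)) 1 [] (le_refl 1) (by omega)
  rw [pow_one] at hloop
  rw [hloop, List.nil_append]
  by_cases hc : PySem.Int.floordiv (max height width) 512 < 2
  · rw [if_pos hc]
    have hN : pvOvlN (max height width) = 0 := by
      unfold pvOvlN
      rw [if_neg (by omega)]
    rw [hN]
    simp [List.range']
  · rw [if_neg hc]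
    show List.map (fun i => (2 : Int) ^ i) (List.range' 1 (pvOvlN (max height width))) =
      List.map (fun k => (2 : Int) ^ k.toNat)
        (PySem.List.pyRange 1 ((PySem.Int.bitLength (PySem.Int.floordiv (max height width) 512) - 1 : Nat) + 1) 1)
    have hN : pvOvlN (max height width) = PySem.Int.bitLength (PySem.Int.floordiv (max height width) 512) - 1 := by
      unfold pvOvlN
      rw [if_pos (by omega)]
    rw [← hN, PySem.List.pyRange_one]
    have harg : ((pvOvlN (max height width) : Int) + 1 - 1).toNat = pvOvlN (max height width) := by omega
    rw [harg, List.range'_eq_map_range, List.map_map, List.map_map]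
    apply List.map_congr_left
    intro a _
    simp [Function.comp]
    omega
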